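-- pv_equiv track=rewrite | github.com/zibneuro/udvary-et-al-2022 | structural_model/util.py | getReverseAxonMap
-- ===== SOURCE A (Python) =====
-- def getReverseAxonMap(mapping):
--     reverseAxonMap = {}
--     for preId, mappedPreId in mapping.items():
--         if(mappedPreId not in reverseAxonMap.keys()):
--             reverseAxonMap[mappedPreId] = []
--         reverseAxonMap[mappedPreId].append(preId)
--     for mappedId, preIds in reverseAxonMap.items():
--         preIds.sort()
--     return reverseAxonMap
-- ===== SOURCE B (Python) =====
-- def getReverseAxonMap(mapping):
--     # Invert by value: one dict comprehension over the distinct mapped ids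
--     # (first-occurrence order), collecting each bucket's keys already sorted.
--     return {v: sorted(k for k, mv in mapping.items() if mv == v)
--             for v in dict.fromkeys(mapping.values())}
-- ===== Notes on version B (the rewrite author's own statement) =====
-- stated objective: simpler
-- what changed: Replaces A's two-phase mutate-then-sort-in-place loops with a single dict comprehension over the distinct mapped ids (dict.fromkeys) that builds each bucket directly as sorted([k for k with that value]).
import Mathlib
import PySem

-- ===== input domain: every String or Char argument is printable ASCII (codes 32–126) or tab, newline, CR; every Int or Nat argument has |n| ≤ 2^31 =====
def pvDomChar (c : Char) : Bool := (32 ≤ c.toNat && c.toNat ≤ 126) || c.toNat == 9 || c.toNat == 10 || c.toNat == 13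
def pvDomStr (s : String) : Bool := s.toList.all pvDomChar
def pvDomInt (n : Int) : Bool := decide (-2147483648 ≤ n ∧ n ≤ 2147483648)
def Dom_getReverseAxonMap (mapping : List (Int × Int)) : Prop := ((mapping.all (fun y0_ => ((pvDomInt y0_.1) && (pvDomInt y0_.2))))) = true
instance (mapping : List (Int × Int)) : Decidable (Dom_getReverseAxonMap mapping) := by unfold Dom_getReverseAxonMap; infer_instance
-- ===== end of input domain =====

-- B builds the inverse map by a dict comprehension over the distinct values instead of
-- A's grouping loop followed by in-place per-bucket sorts (objective: simpler).

-- ===== PORT A =====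
-- first loop: group preIds under mappedPreId (create-empty-then-append, as in A)
def pvGroupA (mapping : List (Int × Int)) : PySem.Dict Int (List Int) :=
  mapping.foldl
    (fun d p =>
      let d' := if d.contains p.2 then d else d.insert p.2 ([] : List Int)
      d'.insert p.2 (d'.getD p.2 [] ++ [p.1]))
    PySem.Dict.empty

def getReverseAxonMap (mapping : List (Int × Int)) : List (Int × List Int) :=
  -- second loop: preIds.sort() in place for every entry
  ((pvGroupA mapping).items.map
    (fun q => (q.1, PySem.List.sorted q.2 (fun x => x) false)))

-- ===== PORT B =====
def getReverseAxonMap_alt (mapping : List (Int × Int)) : List (Int × List Int) :=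
  (PySem.List.dedup (mapping.map (·.2))).map
    (fun v => (v, PySem.List.sorted ((mapping.filter (fun p => p.2 == v)).map (·.1)) (fun x => x) false))

-- ===== PRECONDITION & SPEC =====
def Spec_getReverseAxonMap (mapping : List (Int × Int)) (out : List (Int × List Int)) : Prop := out = getReverseAxonMap_alt mapping
instance (mapping : List (Int × Int)) (out : List (Int × List Int)) : Decidable (Spec_getReverseAxonMap mapping out) := by unfold Spec_getReverseAxonMap; infer_instance

-- ===== CLAIM (what is proved, stated in full; the proofs are below) =====
def Claim_equal_getReverseAxonMap : Prop := ∀ (mapping : List (Int × Int)), Dom_getReverseAxonMap mapping → Spec_getReverseAxonMap mapping (getReverseAxonMap mapping)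

-- ===== LEMMAS AND PROOFS =====

-- A's loop body equals a single modify (append with default [])
lemma pvStep_eq_modify (d : PySem.Dict Int (List Int)) (p : Int × Int) :
    (let d' := if d.contains p.2 then d else d.insert p.2 ([] : List Int)
     d'.insert p.2 (d'.getD p.2 [] ++ [p.1])) = d.modify p.2 [] (· ++ [p.1]) := by
  by_cases h : d.contains p.2 = true
  · simp [h, PySem.Dict.modify]
  · have hf : d.contains p.2 = false := by simpa using h
    have h2 := (PySem.Dict.get?_eq_none_iff_contains (d := d) (k := p.2)).mpr hf
    simp [hf, PySem.Dict.modify, PySem.Dict.insert_insert_self, PySem.Dict.getD, h2]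

lemma pvGroupA_eq_modify (mapping : List (Int × Int)) :
    pvGroupA mapping
      = mapping.foldl (fun d p => d.modify p.2 [] (· ++ [p.1])) PySem.Dict.empty := by
  unfold pvGroupA
  congr 1
  funext d p
  exact pvStep_eq_modify d p

lemma pvGroupA_getD (mapping : List (Int × Int)) (v : Int) :
    (pvGroupA mapping).getD v [] = (mapping.filter (fun p => p.2 == v)).map (·.1) := by
  rw [pvGroupA_eq_modify]
  have hs : mapping.foldl (fun d p => d.modify p.2 [] (· ++ [p.1])) PySem.Dict.empty
      = (mapping.map Prod.swap).foldl (fun d p => d.modify p.1 [] (· ++ [p.2])) PySem.Dict.empty := by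
    rw [List.foldl_map]; simp [Prod.swap]
  rw [hs, PySem.Dict.getD_foldl_modify_append]
  simp [List.filter_map, List.map_map, Function.comp_def]

lemma pvGroupA_keys (mapping : List (Int × Int)) :
    (pvGroupA mapping).keys = PySem.List.dedup (mapping.map (·.2)) := by
  rw [pvGroupA_eq_modify, PySem.Dict.keys_foldl_modify_key]
  rw [PySem.Dict.keys_empty, PySem.Set.update_nil_left]
  simp

lemma pvGroupA_items (mapping : List (Int × Int)) :
    (pvGroupA mapping).items
      = (PySem.List.dedup (mapping.map (·.2))).map
          (fun v => (v, (mapping.filter (fun p => p.2 == v)).map (·.1))) := by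
  have hnd : (pvGroupA mapping).keys.Nodup := by
    rw [pvGroupA_eq_modify]
    exact PySem.Dict.nodup_keys_foldl_modify_key mapping (fun p => p.2) []
      (fun _ p => (· ++ [p.1])) PySem.Dict.empty (by simp)
  rw [PySem.Dict.items_eq_map_keys _ hnd [], pvGroupA_keys]
  exact List.map_congr_left (fun v _ => by rw [pvGroupA_getD])

-- ===== VERDICT (by name: the statement is the Claim_ definition above) =====
theorem getReverseAxonMap_spec : Claim_equal_getReverseAxonMap := by
  intro mapping _
  unfold Spec_getReverseAxonMap getReverseAxonMap getReverseAxonMap_alt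
  rw [pvGroupA_items]
  simp [List.map_map, Function.comp]
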